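-- pv_equiv track=rewrite | github.com/ahakkar/ohj1 | 9-0-0/9-5.py | add_data_to_dict
-- ===== SOURCE A (Python) =====
-- def add_data_to_dict(data) -> dict:
--     """
--     param : TODO
--     return: none
--     """
--
--     movies:dict = {}
--     movies["genres"] = set()
--
--     for row in data:
--         row:str = row.strip()
--         items:list = row.split(";")
--
--         name:str = items[0]
--         current_genres:list = items[1].split(',')
--
--         # add movie & its genres
--         if name not in movies:
--             movies[name] = set(current_genres)
--
--         # add genres
--         for genre in current_genres:
--             movies["genres"].add(genre)
--
--     return movies
-- ===== SOURCE B (Python) =====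
-- def add_data_to_dict(data) -> dict:
--     # pass 1: parse every row once
--     parsed = []
--     for row in data:
--         items = row.strip().split(";")
--         parsed.append((items[0], items[1].split(",")))
--     # pass 2: union of all genres over all rows
--     all_genres = set()
--     for _name, genres in parsed:
--         all_genres.update(genres)
--     # pass 3: first-occurrence movie entries, seeded with the "genres" key
--     movies = {"genres": all_genres}
--     for name, genres in parsed:
--         if name not in movies:
--             movies[name] = set(genres)
--     return movies
-- ===== Notes on version B (the rewrite author's own statement) =====
-- stated objective: simpler
-- what changed: A interleaves everything in one loop (dict insertion plus an inner per-genre set-add loop); B first parses all rows, then computes the global genre union in a separate pass, then seeds the dict with the 'genres' key and fills in first-occurrence movies in a final pass.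
-- outside the precondition, e.g. on add_data_to_dict(['no-semicolon']): A raises IndexError, B raises IndexError
import Mathlib
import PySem

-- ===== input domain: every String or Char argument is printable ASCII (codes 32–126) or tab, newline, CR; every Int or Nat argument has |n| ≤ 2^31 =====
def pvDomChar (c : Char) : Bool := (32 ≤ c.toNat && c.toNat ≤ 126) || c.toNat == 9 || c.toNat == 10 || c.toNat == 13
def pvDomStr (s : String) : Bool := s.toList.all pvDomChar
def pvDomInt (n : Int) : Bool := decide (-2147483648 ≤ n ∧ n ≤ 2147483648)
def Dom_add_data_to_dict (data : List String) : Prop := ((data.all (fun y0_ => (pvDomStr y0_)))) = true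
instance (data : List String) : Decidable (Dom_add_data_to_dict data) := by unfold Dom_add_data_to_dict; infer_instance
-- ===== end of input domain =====

-- B builds the same dict in two separate passes over pre-parsed rows (simpler decomposition, same cost).

-- ===== PORT A =====
-- literal transliteration of A: one loop, dict updated row by row, inner loop adds genres
def add_data_to_dict (data : List String) : List (String × List String) :=
  (data.foldl (fun movies row =>
      let row := PySem.Str.strip row
      let items := (PySem.Str.split? row ";").getD []
      let name := (PySem.List.pyGet? items 0).getD ""
      let current_genres := (PySem.Str.split? ((PySem.List.pyGet? items 1).getD "") ",").getD []
      let movies := if movies.contains name then movies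
                    else movies.insert name (PySem.Set.ofList current_genres)
      current_genres.foldl (fun m genre => m.modify "genres" PySem.Set.empty (fun s => PySem.Set.add s genre)) movies)
    ((PySem.Dict.empty).insert "genres" PySem.Set.empty)).items

-- ===== PORT B =====
-- parse each row into (name, genre list); items[1] raises in Python exactly when ";" is absent (outside Pre_)
def pvParseRow (row : String) : String × List String :=
  let items := (PySem.Str.split? (PySem.Str.strip row) ";").getD []
  ((PySem.List.pyGet? items 0).getD "",
   (PySem.Str.split? ((PySem.List.pyGet? items 1).getD "") ",").getD [])

def add_data_to_dict_alt (data : List String) : List (String × List String) :=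
  let parsed := data.map pvParseRow
  let all_genres := parsed.foldl (fun s p => PySem.Set.update s p.2) PySem.Set.empty
  let movies := (PySem.Dict.empty).insert "genres" all_genres
  (parsed.foldl (fun d p => if d.contains p.1 then d else d.insert p.1 (PySem.Set.ofList p.2)) movies).items

-- ===== PRECONDITION & SPEC =====
-- Pre_ excludes exactly the rows whose stripped text has no ';': there items[1] raises IndexError in A (and in B).
def Pre_add_data_to_dict (data : List String) : Prop :=
  (data.all (fun row => (PySem.Str.strip row).toList.contains ';')) = true
instance (data : List String) : Decidable (Pre_add_data_to_dict data) := by unfold Pre_add_data_to_dict; infer_instance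

def pvWitness_add_data_to_dict : List String := ["a;x,y", " genres;x ", "a;z"]

def Spec_add_data_to_dict (data : List String) (out : List (String × List String)) : Prop := out = add_data_to_dict_alt data
instance (data : List String) (out : List (String × List String)) : Decidable (Spec_add_data_to_dict data out) := by unfold Spec_add_data_to_dict; infer_instance

-- ===== CLAIM (what is proved, stated in full; the proofs are below) =====
def Claim_equal_add_data_to_dict : Prop := ∀ (data : List String), Dom_add_data_to_dict data → Pre_add_data_to_dict data → Spec_add_data_to_dict data (add_data_to_dict data)

-- ===== LEMMAS AND PROOFS =====

-- one iteration of A's loop, phrased on the pre-parsed row (definitionally equal to A's loop body)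
def pvStep (d : PySem.Dict String (List String)) (p : String × List String) : PySem.Dict String (List String) :=
  p.2.foldl (fun m genre => m.modify "genres" PySem.Set.empty (fun s => PySem.Set.add s genre))
    (if d.contains p.1 then d else d.insert p.1 (PySem.Set.ofList p.2))

-- the movie-accumulation recurrence on the dict's tail (past the "genres" head entry)
def pvMovFold (m : List (String × List String)) (ps : List (String × List String)) : List (String × List String) :=
  ps.foldl (fun m p =>
    if ("genres" == p.1 || m.any (fun q => q.1 == p.1)) then m
    else m ++ [(p.1, PySem.Set.ofList p.2)]) m

theorem pvMap_id (m : List (String × List String)) (v : List String)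
    (h : (m.all fun q => !(q.1 == "genres")) = true) :
    List.map (fun p => if p.1 = "genres" then (("genres" : String), v) else p) m = m := by
  induction m with
  | nil => rfl
  | cons q t ih =>
    simp only [List.all_cons, Bool.and_eq_true] at h
    have hq : ¬ (q.1 = "genres") := by simpa using h.1
    simp [hq, ih h.2]

theorem pvGenreLoop (gs : List String) (g : List String) (m : List (String × List String))
    (h : (m.all fun q => !(q.1 == "genres")) = true) :
    gs.foldl (fun d genre => PySem.Dict.modify d "genres" PySem.Set.empty (fun s => PySem.Set.add s genre))
      (PySem.Dict.mk (("genres", g) :: m)) =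
    PySem.Dict.mk (("genres", PySem.Set.update g gs) :: m) := by
  induction gs generalizing g with
  | nil => simp [PySem.Set.update]
  | cons x xs ih =>
    have hstep : PySem.Dict.modify (PySem.Dict.mk (("genres", g) :: m)) "genres" PySem.Set.empty
        (fun s => PySem.Set.add s x) = PySem.Dict.mk (("genres", PySem.Set.add g x) :: m) := by
      simp [PySem.Dict.modify, PySem.Dict.insert, PySem.Dict.contains, PySem.Dict.getD,
            PySem.Dict.get?]
      exact pvMap_id m _ h
    rw [List.foldl_cons, hstep, ih _]
    simp [PySem.Set.update]

-- A's loop, started at any state ("genres", g) :: m, splits into the genre union and the movie fold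
theorem pvMainA (ps : List (String × List String)) (g : List String) (m : List (String × List String))
    (h : (m.all fun q => !(q.1 == "genres")) = true) :
    ps.foldl pvStep (PySem.Dict.mk (("genres", g) :: m)) =
    PySem.Dict.mk (("genres", PySem.Set.update g (ps.flatMap (fun p => p.2))) :: pvMovFold m ps) := by
  induction ps generalizing g m with
  | nil => simp [pvMovFold, PySem.Set.update]
  | cons p t ih =>
    have hcont : (PySem.Dict.mk (("genres", g) :: m)).contains p.1 =
        ("genres" == p.1 || m.any fun q => q.1 == p.1) := rfl
    rw [List.foldl_cons]
    cases hc : ("genres" == p.1 || m.any fun q => q.1 == p.1) with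
    | true =>
      have hstep : pvStep (PySem.Dict.mk (("genres", g) :: m)) p =
          p.2.foldl (fun d genre => PySem.Dict.modify d "genres" PySem.Set.empty (fun s => PySem.Set.add s genre))
            (PySem.Dict.mk (("genres", g) :: m)) := by
        unfold pvStep; rw [hcont, hc]; simp
      rw [hstep, pvGenreLoop _ _ _ h, ih _ _ h]
      simp only [pvMovFold, List.foldl_cons, hc, if_true, List.flatMap_cons,
        PySem.Set.update, List.foldl_append]
    | false =>
      have hm' : ((m ++ [(p.1, PySem.Set.ofList p.2)]).all fun q => !(q.1 == "genres")) = true := by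
        have hp1 : ("genres" == p.1) = false := by
          cases hg : ("genres" == p.1)
          · rfl
          · rw [hg] at hc; simp at hc
        simp only [List.all_append, Bool.and_eq_true]
        refine ⟨h, by simpa using fun hcontra => by rw [hcontra] at hp1; simp at hp1⟩
      have hstep : pvStep (PySem.Dict.mk (("genres", g) :: m)) p =
          p.2.foldl (fun d genre => PySem.Dict.modify d "genres" PySem.Set.empty (fun s => PySem.Set.add s genre))
            (PySem.Dict.mk (("genres", g) :: (m ++ [(p.1, PySem.Set.ofList p.2)]))) := by
        unfold pvStep
        rw [hcont, hc]
        simp only [Bool.false_eq_true, if_false, PySem.Dict.insert, hcont, hc]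
        rfl
      rw [hstep, pvGenreLoop _ _ _ hm', ih _ _ hm']
      simp only [pvMovFold, List.foldl_cons, hc, Bool.false_eq_true, if_false, List.flatMap_cons,
        PySem.Set.update, List.foldl_append]

-- B's movie pass, started at ("genres", U) :: m, never touches the head and runs pvMovFold on the tail
theorem pvMainB (ps : List (String × List String)) (U : List String) (m : List (String × List String)) :
    ps.foldl (fun d p => if d.contains p.1 then d else d.insert p.1 (PySem.Set.ofList p.2))
      (PySem.Dict.mk (("genres", U) :: m)) =
    PySem.Dict.mk (("genres", U) :: pvMovFold m ps) := by
  induction ps generalizing m with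
  | nil => simp [pvMovFold]
  | cons p t ih =>
    have hcont : (PySem.Dict.mk (("genres", U) :: m)).contains p.1 =
        ("genres" == p.1 || m.any fun q => q.1 == p.1) := rfl
    rw [List.foldl_cons]
    cases hc : ("genres" == p.1 || m.any fun q => q.1 == p.1) with
    | true =>
      rw [show (if (PySem.Dict.mk (("genres", U) :: m)).contains p.1 = true
            then PySem.Dict.mk (("genres", U) :: m)
            else (PySem.Dict.mk (("genres", U) :: m)).insert p.1 (PySem.Set.ofList p.2)) =
          PySem.Dict.mk (("genres", U) :: m) from by rw [hcont, hc]; simp]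
      rw [ih]
      simp only [pvMovFold, List.foldl_cons, hc, if_true]
    | false =>
      rw [show (if (PySem.Dict.mk (("genres", U) :: m)).contains p.1 = true
            then PySem.Dict.mk (("genres", U) :: m)
            else (PySem.Dict.mk (("genres", U) :: m)).insert p.1 (PySem.Set.ofList p.2)) =
          PySem.Dict.mk (("genres", U) :: (m ++ [(p.1, PySem.Set.ofList p.2)])) from by
        rw [hcont, hc]
        simp only [Bool.false_eq_true, if_false, PySem.Dict.insert, hcont, hc]
        rfl]
      rw [ih]
      simp only [pvMovFold, List.foldl_cons, hc, Bool.false_eq_true, if_false]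

-- the genre-union pass equals one update over the concatenation of all genre lists
theorem pvUnion (ps : List (String × List String)) (s : List String) :
    ps.foldl (fun s p => PySem.Set.update s p.2) s =
    PySem.Set.update s (ps.flatMap (fun p => p.2)) := by
  induction ps generalizing s with
  | nil => simp [PySem.Set.update]
  | cons p t ih =>
    rw [List.foldl_cons, ih, List.flatMap_cons]
    simp [PySem.Set.update, List.foldl_append]

-- ===== VERDICT (by name: the statement is the Claim_ definition above) =====
set_option maxHeartbeats 1000000 in
theorem add_data_to_dict_spec : Claim_equal_add_data_to_dict := by
  intro data _ _
  unfold Spec_add_data_to_dict add_data_to_dict add_data_to_dict_alt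
  have hfun : (fun (movies : PySem.Dict String (List String)) (row : String) =>
      let row := PySem.Str.strip row
      let items := (PySem.Str.split? row ";").getD []
      let name := (PySem.List.pyGet? items 0).getD ""
      let current_genres := (PySem.Str.split? ((PySem.List.pyGet? items 1).getD "") ",").getD []
      let movies := if movies.contains name then movies
                    else movies.insert name (PySem.Set.ofList current_genres)
      current_genres.foldl (fun m genre => m.modify "genres" PySem.Set.empty (fun s => PySem.Set.add s genre)) movies) =
      (fun movies row => pvStep movies (pvParseRow row)) := by
    funext movies row
    dsimp only [pvStep, pvParseRow]
  rw [hfun]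
  rw [show data.foldl (fun movies row => pvStep movies (pvParseRow row))
        ((PySem.Dict.empty : PySem.Dict String (List String)).insert "genres" PySem.Set.empty) =
      (data.map pvParseRow).foldl pvStep (PySem.Dict.mk [("genres", PySem.Set.empty)]) from
    (List.foldl_map (f := pvParseRow) (g := pvStep)).symm]
  rw [pvMainA _ PySem.Set.empty [] rfl]
  show _ = ((data.map pvParseRow).foldl
      (fun d p => if d.contains p.1 then d else d.insert p.1 (PySem.Set.ofList p.2))
      (PySem.Dict.mk [("genres",
        (data.map pvParseRow).foldl (fun s p => PySem.Set.update s p.2) PySem.Set.empty)])).items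
  rw [pvMainB, pvUnion]
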